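-- pv_equiv track=rewrite | github.com/koba925/alds | atcoder/ABC096/C.py | grid_repainting_2
-- ===== SOURCE A (Python) =====
-- def grid_repainting_2(H, W, S):
--     def black_neighbors(r, c):
--         for delta in [[-1, 0], [1, 0], [0, -1], [0, 1]]:
--             nr = r + delta[0]
--             nc = c + delta[1]
--             if 0 <= nr < H and 0 <= nc < W and S[nr][nc] == "#":
--                 return True
--         return False
--
--     for r in range(H):
--         for w in range(W):
--             if S[r][w] == "#" and not black_neighbors(r, w):
--                 return False
--     return True
-- ===== SOURCE B (Python) =====
-- def grid_repainting_2(H, W, S):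
--     satisfied = set()
--     for r in range(H):
--         for c in range(W - 1):
--             if S[r][c] == "#" and S[r][c + 1] == "#":
--                 satisfied.add((r, c))
--                 satisfied.add((r, c + 1))
--     for r in range(H - 1):
--         for c in range(W):
--             if S[r][c] == "#" and S[r + 1][c] == "#":
--                 satisfied.add((r, c))
--                 satisfied.add((r + 1, c))
--     for r in range(H):
--         for c in range(W):
--             if S[r][c] == "#" and (r, c) not in satisfied:
--                 return False
--     return True
-- ===== Notes on version B (the rewrite author's own statement) =====
-- stated objective: alternative
-- what changed: Replaces the per-cell four-direction neighbor probe with early return by a two-phase edge scan: one pass over horizontal and vertical adjacent pairs builds a 'satisfied' set of cells belonging to an all-black edge, then one verification pass checks every black cell is in that set. Pre_ excludes ill-shaped grids (fewer than H rows, or a row shorter than W) where both programs index out of range; A may still return False early there when it finds an unsatisfied black cell first, B's full edge scan raises.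
-- outside the precondition, e.g. on grid_repainting_2(69, 1, ['#', 'c']): A returns False, B raises IndexError
import Mathlib
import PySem

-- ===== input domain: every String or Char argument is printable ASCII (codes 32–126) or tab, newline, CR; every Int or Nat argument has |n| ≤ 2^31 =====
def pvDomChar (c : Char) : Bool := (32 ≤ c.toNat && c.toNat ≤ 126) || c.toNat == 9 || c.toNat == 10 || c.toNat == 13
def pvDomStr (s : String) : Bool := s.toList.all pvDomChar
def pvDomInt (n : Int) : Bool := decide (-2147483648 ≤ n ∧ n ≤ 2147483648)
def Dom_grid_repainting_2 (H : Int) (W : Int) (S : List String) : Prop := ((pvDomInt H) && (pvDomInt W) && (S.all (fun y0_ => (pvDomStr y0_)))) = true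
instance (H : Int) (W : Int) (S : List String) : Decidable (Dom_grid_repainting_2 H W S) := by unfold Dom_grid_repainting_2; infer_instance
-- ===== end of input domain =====

-- B replaces A's per-cell four-direction neighbor probe by a two-phase edge scan
-- (build a set of cells on an all-black edge, then verify every black cell is in it);
-- objective: alternative decomposition, same asymptotic cost.

-- ===== PORT A =====
-- S[r][c] == "#" (A indexes only with 0 ≤ r, c; out-of-range gives none, i.e. false here — inside Pre_ every access A makes is in range)
def pvA_cell (S : List String) (r c : Int) : Bool :=
  match PySem.List.pyGet? S r with
  | some row => PySem.Str.pyGet? row c == some '#'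
  | none => false

def pvA_blackNeighbors (H : Int) (W : Int) (S : List String) (r c : Int) : Bool :=
  [((-1 : Int), (0 : Int)), (1, 0), (0, -1), (0, 1)].any (fun d =>
    let nr := r + d.1
    let nc := c + d.2
    decide (0 ≤ nr) && decide (nr < H) && decide (0 ≤ nc) && decide (nc < W) && pvA_cell S nr nc)

def grid_repainting_2 (H : Int) (W : Int) (S : List String) : Bool :=
  (PySem.List.pyRange 0 H 1).all (fun r =>
    (PySem.List.pyRange 0 W 1).all (fun w =>
      !(pvA_cell S r w && !(pvA_blackNeighbors H W S r w))))

-- ===== PORT B =====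
def pvB_cell (S : List String) (r c : Int) : Bool :=
  ((PySem.List.pyGet? S r).bind (fun row => PySem.Str.pyGet? row c)) == some '#'

-- the 'satisfied' set: endpoints of every all-black horizontal or vertical edge
def pvB_sat (H : Int) (W : Int) (S : List String) : PySem.Set (Int × Int) :=
  let s1 : PySem.Set (Int × Int) :=
    (PySem.List.pyRange 0 H 1).foldl (fun acc r =>
      (PySem.List.pyRange 0 (W - 1) 1).foldl (fun acc c =>
        if pvB_cell S r c && pvB_cell S r (c + 1) then
          PySem.Set.add (PySem.Set.add acc (r, c)) (r, c + 1)
        else acc) acc)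
      PySem.Set.empty
  (PySem.List.pyRange 0 (H - 1) 1).foldl (fun acc r =>
    (PySem.List.pyRange 0 W 1).foldl (fun acc c =>
      if pvB_cell S r c && pvB_cell S (r + 1) c then
        PySem.Set.add (PySem.Set.add acc (r, c)) (r + 1, c)
      else acc) acc)
    s1

def grid_repainting_2_alt (H : Int) (W : Int) (S : List String) : Bool :=
  let sat := pvB_sat H W S
  (PySem.List.pyRange 0 H 1).all (fun r =>
    (PySem.List.pyRange 0 W 1).all (fun c =>
      !(pvB_cell S r c && !(PySem.Set.contains sat (r, c)))))

-- ===== PRECONDITION & SPEC =====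
-- Pre_ excludes the ill-shaped grids (H,W positive but S has fewer than H rows or one of the
-- first H rows shorter than W) on which both Pythons index out of
-- range; A may still return False early there when it finds an unsatisfied black cell before
-- the out-of-range access, while B's full edge scan raises first.
def Pre_grid_repainting_2 (H : Int) (W : Int) (S : List String) : Prop :=
  H ≤ 0 ∨ W ≤ 0 ∨ (H ≤ (S.length : Int) ∧ ∀ s ∈ S.take H.toNat, W ≤ (s.toList.length : Int))
instance (H : Int) (W : Int) (S : List String) : Decidable (Pre_grid_repainting_2 H W S) := by
  unfold Pre_grid_repainting_2; infer_instance

def pvWitness_grid_repainting_2 : Int × Int × List String := (2, 2, ["##", ".#"])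

def Spec_grid_repainting_2 (H : Int) (W : Int) (S : List String) (out : Bool) : Prop := out = grid_repainting_2_alt H W S
instance (H : Int) (W : Int) (S : List String) (out : Bool) : Decidable (Spec_grid_repainting_2 H W S out) := by unfold Spec_grid_repainting_2; infer_instance

-- ===== CLAIM (what is proved, stated in full; the proofs are below) =====
def Claim_equal_grid_repainting_2 : Prop := ∀ (H : Int) (W : Int) (S : List String), Dom_grid_repainting_2 H W S → Pre_grid_repainting_2 H W S → Spec_grid_repainting_2 H W S (grid_repainting_2 H W S)

-- ===== LEMMAS AND PROOFS =====

theorem pv_cell_eq (S : List String) (r c : Int) : pvA_cell S r c = pvB_cell S r c := by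
  unfold pvA_cell pvB_cell
  cases PySem.List.pyGet? S r <;> rfl

-- membership in the inner edge-scan fold
theorem pv_mem_foldl_if_add2 {α : Type} [BEq α] [LawfulBEq α] (L : List Int) (p : Int → Bool)
    (f g : Int → α) (acc : List α) (x : α) :
    x ∈ L.foldl (fun a c => if p c then PySem.Set.add (PySem.Set.add a (f c)) (g c) else a) acc ↔
      x ∈ acc ∨ ∃ c ∈ L, p c = true ∧ (x = f c ∨ x = g c) := by
  induction L generalizing acc with
  | nil => simp
  | cons hd tl ih =>
    simp only [List.foldl_cons]
    by_cases hp : p hd = true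
    · rw [if_pos hp, ih]
      simp only [PySem.Set.mem_add, List.mem_cons]
      constructor
      · rintro (((h | h) | h) | ⟨c, hc, hpc, hx⟩)
        · exact Or.inl h
        · exact Or.inr ⟨hd, Or.inl rfl, hp, Or.inl h⟩
        · exact Or.inr ⟨hd, Or.inl rfl, hp, Or.inr h⟩
        · exact Or.inr ⟨c, Or.inr hc, hpc, hx⟩
      · rintro (h | ⟨c, (rfl | hc), hpc, hx⟩)
        · exact Or.inl (Or.inl (Or.inl h))
        · rcases hx with h | h
          · exact Or.inl (Or.inl (Or.inr h))
          · exact Or.inl (Or.inr h)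
        · exact Or.inr ⟨c, hc, hpc, hx⟩
    · rw [if_neg hp, ih]
      simp only [List.mem_cons]
      constructor
      · rintro (h | ⟨c, hc, hpc, hx⟩)
        · exact Or.inl h
        · exact Or.inr ⟨c, Or.inr hc, hpc, hx⟩
      · rintro (h | ⟨c, (rfl | hc), hpc, hx⟩)
        · exact Or.inl h
        · exact absurd hpc hp
        · exact Or.inr ⟨c, hc, hpc, hx⟩

-- membership through an outer fold whose step only adds elements
theorem pv_mem_foldl_outer {α : Type} (L : List Int)
    (step : List α → Int → List α) (Q : Int → α → Prop)
    (h : ∀ a r x, x ∈ step a r ↔ x ∈ a ∨ Q r x) (acc : List α) (x : α) :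
    x ∈ L.foldl step acc ↔ x ∈ acc ∨ ∃ r ∈ L, Q r x := by
  induction L generalizing acc with
  | nil => simp
  | cons hd tl ih =>
    simp only [List.foldl_cons, ih, h, List.mem_cons]
    constructor
    · rintro ((h1 | h1) | ⟨r, hr, hq⟩)
      · exact Or.inl h1
      · exact Or.inr ⟨hd, Or.inl rfl, h1⟩
      · exact Or.inr ⟨r, Or.inr hr, hq⟩
    · rintro (h1 | ⟨r, (rfl | hr), hq⟩)
      · exact Or.inl (Or.inl h1)
      · exact Or.inl (Or.inr hq)
      · exact Or.inr ⟨r, hr, hq⟩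

theorem pv_mem_sat (H W : Int) (S : List String) (x : Int × Int) :
    x ∈ pvB_sat H W S ↔
      (∃ r ∈ PySem.List.pyRange 0 H 1, ∃ c ∈ PySem.List.pyRange 0 (W - 1) 1,
        (pvB_cell S r c && pvB_cell S r (c + 1)) = true ∧ (x = (r, c) ∨ x = (r, c + 1))) ∨
      (∃ r ∈ PySem.List.pyRange 0 (H - 1) 1, ∃ c ∈ PySem.List.pyRange 0 W 1,
        (pvB_cell S r c && pvB_cell S (r + 1) c) = true ∧ (x = (r, c) ∨ x = (r + 1, c))) := by
  unfold pvB_sat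
  rw [pv_mem_foldl_outer _ _
    (fun r x => ∃ c ∈ PySem.List.pyRange 0 W 1,
      (pvB_cell S r c && pvB_cell S (r + 1) c) = true ∧ (x = (r, c) ∨ x = (r + 1, c)))
    (fun a r y => pv_mem_foldl_if_add2 _ _ _ _ a y)]
  rw [pv_mem_foldl_outer _ _
    (fun r x => ∃ c ∈ PySem.List.pyRange 0 (W - 1) 1,
      (pvB_cell S r c && pvB_cell S r (c + 1)) = true ∧ (x = (r, c) ∨ x = (r, c + 1)))
    (fun a r y => pv_mem_foldl_if_add2 _ _ _ _ a y)]
  simp [PySem.Set.empty]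

theorem pv_cell_contains_iff (H W : Int) (S : List String) (r c : Int)
    (hr0 : 0 ≤ r) (hrH : r < H) (hc0 : 0 ≤ c) (hcW : c < W)
    (hb : pvB_cell S r c = true) :
    PySem.Set.contains (pvB_sat H W S) (r, c) = pvA_blackNeighbors H W S r c := by
  rw [Bool.eq_iff_iff, PySem.Set.contains_iff, pv_mem_sat]
  unfold pvA_blackNeighbors
  simp only [List.any_cons, List.any_nil, Bool.or_eq_true, Bool.and_eq_true, decide_eq_true_eq,
    Bool.or_false, pv_cell_eq, PySem.List.mem_pyRange_one, Prod.mk.injEq]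
  simp only [← sub_eq_add_neg, add_zero]
  constructor
  · rintro (⟨r', ⟨hr1, hr2⟩, c', ⟨hc1, hc2⟩, ⟨h1, h2⟩, (⟨rfl, rfl⟩ | ⟨rfl, rfl⟩)⟩ |
            ⟨r', ⟨hr1, hr2⟩, c', ⟨hc1, hc2⟩, ⟨h1, h2⟩, (⟨rfl, rfl⟩ | ⟨rfl, rfl⟩)⟩)
    · -- x = (r', c'): right neighbor (r, c+1) is black
      exact Or.inr (Or.inr (Or.inr ⟨⟨⟨⟨by omega, by omega⟩, by omega⟩, by omega⟩, h2⟩))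
    · -- x = (r', c'+1): left neighbor (r, c-1) is black
      refine Or.inr (Or.inr (Or.inl ⟨⟨⟨⟨by omega, by omega⟩, by omega⟩, by omega⟩, ?_⟩))
      rw [show c' + 1 - 1 = c' by ring]; exact h1
    · -- x = (r', c'): down neighbor (r+1, c) is black
      exact Or.inr (Or.inl ⟨⟨⟨⟨by omega, by omega⟩, by omega⟩, by omega⟩, h2⟩)
    · -- x = (r'+1, c'): up neighbor (r-1, c) is black
      refine Or.inl ⟨⟨⟨⟨by omega, by omega⟩, by omega⟩, by omega⟩, ?_⟩
      rw [show r' + 1 - 1 = r' by ring]; exact h1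
  · rintro (⟨⟨⟨⟨h1, h2⟩, h3⟩, h4⟩, hn⟩ | ⟨⟨⟨⟨h1, h2⟩, h3⟩, h4⟩, hn⟩ |
            ⟨⟨⟨⟨h1, h2⟩, h3⟩, h4⟩, hn⟩ | ⟨⟨⟨⟨h1, h2⟩, h3⟩, h4⟩, hn⟩)
    · -- up neighbor black: vertical edge (r-1, c)-(r, c)
      refine Or.inr ⟨r - 1, ⟨by omega, by omega⟩, c, ⟨by omega, by omega⟩,
        ⟨hn, by rw [show r - 1 + 1 = r by ring]; exact hb⟩, Or.inr ⟨by omega, rfl⟩⟩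
    · -- down neighbor black: vertical edge (r, c)-(r+1, c)
      exact Or.inr ⟨r, ⟨by omega, by omega⟩, c, ⟨by omega, by omega⟩, ⟨hb, hn⟩, Or.inl ⟨rfl, rfl⟩⟩
    · -- left neighbor black: horizontal edge (r, c-1)-(r, c)
      refine Or.inl ⟨r, ⟨by omega, by omega⟩, c - 1, ⟨by omega, by omega⟩,
        ⟨hn, by rw [show c - 1 + 1 = c by ring]; exact hb⟩, Or.inr ⟨rfl, by omega⟩⟩
    · -- right neighbor black: horizontal edge (r, c)-(r, c+1)
      exact Or.inl ⟨r, ⟨by omega, by omega⟩, c, ⟨by omega, by omega⟩, ⟨hb, hn⟩, Or.inl ⟨rfl, rfl⟩⟩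

theorem pv_main (H W : Int) (S : List String) :
    grid_repainting_2 H W S = grid_repainting_2_alt H W S := by
  unfold grid_repainting_2 grid_repainting_2_alt
  rw [Bool.eq_iff_iff]
  simp only [List.all_eq_true, PySem.List.mem_pyRange_one]
  constructor <;> intro h r hr c hc <;> have hrc := h r hr c hc <;>
    revert hrc <;>
    by_cases hb : pvB_cell S r c = true
  · rw [pv_cell_eq, hb,
      pv_cell_contains_iff H W S r c hr.1 hr.2 hc.1 hc.2 hb]
    exact id
  · intro _; simp [hb]
  · rw [pv_cell_eq, hb,
      pv_cell_contains_iff H W S r c hr.1 hr.2 hc.1 hc.2 hb]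
    exact id
  · intro _; simp [pv_cell_eq, hb]

-- ===== VERDICT (by name: the statement is the Claim_ definition above) =====
theorem grid_repainting_2_spec : Claim_equal_grid_repainting_2 := by
  intro H W S _ _
  unfold Spec_grid_repainting_2
  exact pv_main H W S
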